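-- pv_equiv track=rewrite | github.com/Josh-Abbott/355-Lab3 | Lab3.py | getMonthlyCases
-- ===== SOURCE A (Python) =====
-- def getMonthlyCases(data):
--      monthly_cases = {}
--      for county, monthly_data in data.items():
--           for month, cases_count in monthly_data.items():
--                if month not in monthly_cases:
--                     monthly_cases[month] = {}
--                monthly_cases[month][county] = cases_count
--      return monthly_cases
-- ===== SOURCE B (Python) =====
-- def getMonthlyCases(data):
--      all_months = list(dict.fromkeys(month for monthly_data in data.values()
--                                      for month in monthly_data))
--      return {month: {county: monthly_data[month]
--                      for county, monthly_data in data.items()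
--                      if month in monthly_data}
--              for month in all_months}
-- ===== Notes on version B (the rewrite author's own statement) =====
-- stated objective: alternative
-- what changed: B inverts the traversal: it first collects the ordered set of all months (dict.fromkeys over every inner dict), then builds the transpose month-by-month with one comprehension over counties per month, instead of streaming (county, month, cases) entries into a mutable nested accumulator.
import Mathlib
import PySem

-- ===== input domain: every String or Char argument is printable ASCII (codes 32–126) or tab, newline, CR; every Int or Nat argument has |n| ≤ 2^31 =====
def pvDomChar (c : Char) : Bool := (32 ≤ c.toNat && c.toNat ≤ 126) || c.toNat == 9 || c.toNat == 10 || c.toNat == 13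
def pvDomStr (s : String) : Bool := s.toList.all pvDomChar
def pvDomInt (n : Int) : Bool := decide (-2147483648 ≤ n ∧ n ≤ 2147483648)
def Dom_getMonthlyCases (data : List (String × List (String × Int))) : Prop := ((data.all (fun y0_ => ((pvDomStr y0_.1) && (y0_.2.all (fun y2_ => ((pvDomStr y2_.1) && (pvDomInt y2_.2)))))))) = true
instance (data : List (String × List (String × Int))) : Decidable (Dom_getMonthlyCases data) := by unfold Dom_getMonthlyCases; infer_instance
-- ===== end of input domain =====

-- B inverts the traversal (collect all months first, then build the transpose month-by-month);
-- objective: an alternative decomposition (not faster; it does one dict lookup per month-county pair). Equivalence of the RETURN values is proved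
-- on association lists whose county keys are distinct (Pre_): duplicate county keys do not
-- represent any Python dict, so both behaviours there are accidental.


-- ===== PORT A =====
-- the body of A's inner loop: 'if month not in monthly_cases: monthly_cases[month] = {}' then
-- 'monthly_cases[month][county] = cases_count'  (county is the loop's fixed outer variable c)
def pvStep (c : String) (monthly_cases : PySem.Dict String (PySem.Dict String Int))
    (mv : String × Int) : PySem.Dict String (PySem.Dict String Int) :=
  let mc := if monthly_cases.contains mv.1 then monthly_cases
            else monthly_cases.insert mv.1 PySem.Dict.empty
  mc.insert mv.1 ((mc.getD mv.1 PySem.Dict.empty).insert c mv.2)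

def getMonthlyCases (data : List (String × List (String × Int))) : List (String × List (String × Int)) :=
  (data.foldl (fun monthly_cases cm => cm.2.foldl (pvStep cm.1) monthly_cases)
      (PySem.Dict.empty : PySem.Dict String (PySem.Dict String Int))).items.map
    (fun p => (p.1, p.2.items))

-- ===== PORT B =====
-- the inner dict comprehension of Source B for a fixed month:
-- {county: monthly_data[month] for county, monthly_data in data.items() if month in monthly_data}
def pvRow (data : List (String × List (String × Int))) (month : String) : List (String × Int) :=
  data.filterMap (fun cm => ((PySem.Dict.ofList cm.2).get? month).map (fun v => (cm.1, v)))

def getMonthlyCases_alt (data : List (String × List (String × Int))) : List (String × List (String × Int)) :=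
  let all_months := PySem.List.dedup (data.flatMap (fun cm => cm.2.map (fun mv => mv.1)))
  all_months.map (fun month => (month, pvRow data month))

-- ===== PRECONDITION & SPEC =====
-- Pre_ excludes association lists with duplicate county keys: they do not represent any Python
-- dict (A's argument is a dict, which cannot carry duplicate keys), so any behaviour on them is
-- an artefact of the list encoding.
def Pre_getMonthlyCases (data : List (String × List (String × Int))) : Prop :=
  (data.map (fun cm => cm.1)).Nodup
instance (data : List (String × List (String × Int))) : Decidable (Pre_getMonthlyCases data) := by
  unfold Pre_getMonthlyCases; infer_instance

def pvWitness_getMonthlyCases : (List (String × List (String × Int))) :=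
  [("Adams", [("2020-01", 10), ("2020-02", 7)]), ("Brown", [("2020-02", 3)])]

def Spec_getMonthlyCases (data : List (String × List (String × Int))) (out : List (String × List (String × Int))) : Prop := out = getMonthlyCases_alt data
instance (data : List (String × List (String × Int))) (out : List (String × List (String × Int))) : Decidable (Spec_getMonthlyCases data out) := by unfold Spec_getMonthlyCases; infer_instance

-- ===== CLAIM (what is proved, stated in full; the proofs are below) =====
def Claim_equal_getMonthlyCases : Prop := ∀ (data : List (String × List (String × Int))), Dom_getMonthlyCases data → Pre_getMonthlyCases data → Spec_getMonthlyCases data (getMonthlyCases data)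

-- ===== LEMMAS AND PROOFS =====

-- all (county, month) keys flattened, in traversal order
def pvMonths (data : List (String × List (String × Int))) : List String :=
  data.flatMap (fun cm => cm.2.map (fun mv => mv.1))

lemma pv_ofList_snoc {ν : Type} (l : List (String × ν)) (m : String) (v : ν) :
    PySem.Dict.ofList (l ++ [(m, v)]) = (PySem.Dict.ofList l).insert m v := by
  simp [PySem.Dict.ofList, PySem.Dict.update, List.foldl_append]

lemma pv_get?_ofList_eq_none {ν : Type} (md : List (String × ν)) (m : String)
    (h : m ∉ md.map Prod.fst) : (PySem.Dict.ofList md).get? m = none := by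
  rw [PySem.Dict.get?_eq_none_iff_not_mem_keys]
  have hk : (PySem.Dict.ofList md).keys
      = PySem.Set.update (PySem.Dict.empty (κ := String) (ν := ν)).keys (md.map Prod.fst) :=
    PySem.Dict.keys_foldl_insert_key md Prod.fst (fun _ x => x.2) PySem.Dict.empty
  rw [hk]
  intro hmem
  rcases (PySem.Set.mem_update _ _ _).1 hmem with h1 | h1
  · simp [PySem.Dict.keys_empty] at h1
  · exact h h1

lemma pv_contains_mk_map {ν : Type} (L : List String) (f : String → ν) (x : String) :
    (PySem.Dict.mk (L.map (fun m => (m, f m)))).contains x = L.contains x := by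
  show (L.map (fun m => (m, f m))).any (fun p => p.1 == x) = L.contains x
  rw [List.any_map]
  induction L with
  | nil => rfl
  | cons a L ih =>
    simp only [List.any_cons, ih, List.contains_cons, Function.comp_apply]
    rw [show (a == x) = (x == a) by simp [eq_comm]]

-- after A's 'if month not in monthly_cases' line the key list is exactly PySem.Set.add L m
lemma pv_ensure_key (L : List String) (g : String → List (String × Int)) (m : String)
    (hout : m ∉ L → g m = []) :
    (if (PySem.Dict.mk (L.map (fun m' => (m', PySem.Dict.mk (g m'))))).contains m then
        PySem.Dict.mk (L.map (fun m' => (m', PySem.Dict.mk (g m'))))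
      else (PySem.Dict.mk (L.map (fun m' => (m', PySem.Dict.mk (g m'))))).insert m PySem.Dict.empty)
      = PySem.Dict.mk ((PySem.Set.add L m).map (fun m' => (m', PySem.Dict.mk (g m')))) := by
  rw [pv_contains_mk_map]
  by_cases hm : m ∈ L
  · rw [if_pos (List.contains_iff_mem.2 hm)]
    unfold PySem.Set.add
    rw [if_pos (by exact List.contains_iff_mem.2 hm)]
  · have hc : L.contains m = false := by
      rw [Bool.eq_false_iff]; intro hx; exact hm (List.contains_iff_mem.1 hx)
    rw [if_neg (by simpa using hm)]
    unfold PySem.Set.add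
    rw [if_neg (by simpa [PySem.Set.contains] using hm)]
    apply PySem.Dict.ext
    rw [PySem.Dict.items_insert_of_not_contains _ _ (by rw [pv_contains_mk_map]; exact hc)]
    simp [hout hm, PySem.Dict.empty]

-- 'monthly_cases[month][county] = cases_count' on a row that carries county c at most last
lemma pv_insert_row (l : List (String × Int)) (c : String) (v : Int)
    (h : ∀ q ∈ l, q.1 ≠ c) (opt : Option Int) :
    (PySem.Dict.mk (l ++ (opt.map (fun w => (c, w))).toList)).insert c v
      = PySem.Dict.mk (l ++ [(c, v)]) := by
  have hany : l.any (fun q => q.1 == c) = false := by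
    rw [List.any_eq_false]; intro q hq; simpa using h q hq
  apply PySem.Dict.ext
  cases opt with
  | none =>
    rw [PySem.Dict.items_insert_of_not_contains _ _ (by simpa [PySem.Dict.contains] using hany)]
    simp
  | some w =>
    rw [PySem.Dict.items_insert_of_contains _ _ (by simp [PySem.Dict.contains])]
    show (l ++ [(c, w)]).map _ = _
    rw [List.map_append]
    congr 1
    · rw [List.map_congr_left (fun q hq => if_neg (by simpa using h q hq))]
      exact List.map_id l
    · simp

-- effect of A's inner loop over one county's month list on a state of the canonical shape
lemma pv_inner (c : String) (md : List (String × Int)) (L : List String)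
    (g : String → List (String × Int)) (hL : L.Nodup)
    (hg : ∀ m, ∀ q ∈ g m, q.1 ≠ c)
    (hout : ∀ m, m ∉ L → g m = []) :
    md.foldl (pvStep c) (PySem.Dict.mk (L.map (fun m => (m, PySem.Dict.mk (g m))))) =
    PySem.Dict.mk ((PySem.Set.update L (md.map Prod.fst)).map
      (fun m => (m, PySem.Dict.mk
        (g m ++ (((PySem.Dict.ofList md).get? m).map (fun v => (c, v))).toList)))) := by
  induction md using List.reverseRecOn with
  | nil =>
    simp [PySem.Set.update, PySem.Dict.ofList, PySem.Dict.update, PySem.Dict.get?,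
      PySem.Dict.empty]
  | append_singleton p x ih =>
    obtain ⟨m, v⟩ := x
    rw [List.foldl_append, ih, List.foldl_cons, List.foldl_nil]
    set Lp := PySem.Set.update L (p.map Prod.fst) with hLp
    have hLpnd : Lp.Nodup := PySem.Set.nodup_update _ _ hL
    set gp : String → List (String × Int) :=
      fun m' => g m' ++ (((PySem.Dict.ofList p).get? m').map (fun v => (c, v))).toList with hgp
    have hgpout : m ∉ Lp → gp m = [] := by
      intro hm
      have hmL : m ∉ L := fun hx => hm ((PySem.Set.mem_update _ _ _).2 (Or.inl hx))
      have hmp : m ∉ p.map Prod.fst := fun hx => hm ((PySem.Set.mem_update _ _ _).2 (Or.inr hx))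
      simp [hgp, hout m hmL, pv_get?_ofList_eq_none p m hmp]
    show pvStep c (PySem.Dict.mk (Lp.map (fun m' => (m', PySem.Dict.mk (gp m'))))) (m, v) = _
    unfold pvStep
    rw [pv_ensure_key Lp gp m hgpout]
    set L' := PySem.Set.add Lp m with hL'
    have hmem : m ∈ L' := (PySem.Set.mem_add _ _ _).2 (Or.inr rfl)
    have hL'nd : L'.Nodup := PySem.Set.nodup_add _ _ hLpnd
    have hkeyseq : (PySem.Dict.mk (L'.map (fun m' => (m', PySem.Dict.mk (gp m'))))).keys = L' := by
      simp [PySem.Dict.keys, List.map_map, Function.comp_def]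
    have hkeysnd : (PySem.Dict.mk (L'.map (fun m' => (m', PySem.Dict.mk (gp m'))))).keys.Nodup := by
      rw [hkeyseq]; exact hL'nd
    have hmemitems : (m, PySem.Dict.mk (gp m))
        ∈ (PySem.Dict.mk (L'.map (fun m' => (m', PySem.Dict.mk (gp m'))))).items :=
      List.mem_map_of_mem hmem
    have hgetD : (PySem.Dict.mk (L'.map (fun m' => (m', PySem.Dict.mk (gp m'))))).getD m
        PySem.Dict.empty = PySem.Dict.mk (gp m) :=
      PySem.Dict.getD_of_mem_items _ hmemitems hkeysnd _
    show (PySem.Dict.mk (L'.map (fun m' => (m', PySem.Dict.mk (gp m'))))).insert m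
        (((PySem.Dict.mk (L'.map (fun m' => (m', PySem.Dict.mk (gp m'))))).getD m
          PySem.Dict.empty).insert c v) = _
    rw [hgetD]
    have hrow : (PySem.Dict.mk (gp m)).insert c v = PySem.Dict.mk (g m ++ [(c, v)]) := by
      rw [hgp]
      exact pv_insert_row (g m) c v (hg m) _
    rw [hrow]
    apply PySem.Dict.ext
    rw [PySem.Dict.items_insert_of_contains _ _
      (by rw [pv_contains_mk_map]; exact List.contains_iff_mem.2 hmem)]
    have hupd : PySem.Set.update L ((p ++ [(m, v)]).map Prod.fst) = L' := by
      rw [hL', hLp]; simp [PySem.Set.update, List.foldl_append]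
    show (L'.map (fun m' => (m', PySem.Dict.mk (gp m')))).map _ = _
    rw [hupd, List.map_map]
    apply List.map_congr_left
    intro m' hm'
    by_cases hcase : m' = m
    · subst hcase
      simp only [Function.comp_apply, BEq.rfl, if_pos]
      rw [pv_ofList_snoc, PySem.Dict.get?_insert]
      simp
    · have hbeq : (m' == m) = false := by simpa using hcase
      simp only [Function.comp_apply, hbeq, Bool.false_eq_true, if_false]
      rw [pv_ofList_snoc, PySem.Dict.get?_insert]
      rw [if_neg hcase, hgp]

-- A's whole double loop, characterised
lemma pv_big (data : List (String × List (String × Int)))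
    (h : (data.map (fun cm => cm.1)).Nodup) :
    data.foldl (fun monthly_cases cm => cm.2.foldl (pvStep cm.1) monthly_cases)
        (PySem.Dict.empty : PySem.Dict String (PySem.Dict String Int)) =
    PySem.Dict.mk ((PySem.List.dedup (pvMonths data)).map
      (fun m => (m, PySem.Dict.mk (pvRow data m)))) := by
  induction data using List.reverseRecOn with
  | nil =>
    simp [pvMonths, PySem.List.dedup, PySem.Set.ofList, PySem.Set.empty, PySem.Dict.empty]
  | append_singleton d cmd ih =>
    obtain ⟨cc, md⟩ := cmd
    rw [List.map_append] at h
    have hnd : (d.map (fun cm => cm.1)).Nodup := (List.nodup_append.1 h).1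
    have hcnew : cc ∉ d.map (fun cm => cm.1) := by
      intro hx
      have hmem1 : cc ∈ List.map (fun cm => cm.1) [(cc, md)] := by simp
      exact (List.nodup_append.1 h).2.2 cc hx cc hmem1 rfl
    rw [List.foldl_append, List.foldl_cons, List.foldl_nil, ih hnd]
    have hg : ∀ m, ∀ q ∈ pvRow d m, q.1 ≠ cc := by
      intro m q hq
      rcases List.mem_filterMap.1 hq with ⟨cm, hcm, hopt⟩
      rcases Option.map_eq_some_iff.1 hopt with ⟨w, hw, hq'⟩
      intro hqc
      exact hcnew (by
        rw [← hqc, ← hq']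
        exact List.mem_map_of_mem hcm)
    have hout : ∀ m, m ∉ PySem.List.dedup (pvMonths d) → pvRow d m = [] := by
      intro m hm
      rw [PySem.List.mem_dedup] at hm
      apply List.filterMap_eq_nil_iff.2
      intro cm hcm
      rw [pv_get?_ofList_eq_none cm.2 m (fun hx => hm (List.mem_flatMap.2 ⟨cm, hcm, hx⟩))]
      rfl
    rw [pv_inner cc md (PySem.List.dedup (pvMonths d)) (pvRow d)
      (by rw [PySem.List.dedup_eq_ofList]; exact PySem.Set.nodup_ofList _) hg hout]
    have hkeys : PySem.Set.update (PySem.List.dedup (pvMonths d)) (md.map Prod.fst)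
        = PySem.List.dedup (pvMonths (d ++ [(cc, md)])) := by
      simp only [PySem.List.dedup_eq_ofList, pvMonths, List.flatMap_append]
      rw [PySem.Set.ofList_append]
      simp [PySem.Set.update]
    have hrows : ∀ m, pvRow d m ++ (((PySem.Dict.ofList md).get? m).map (fun v => (cc, v))).toList
        = pvRow (d ++ [(cc, md)]) m := by
      intro m
      cases hopt : (PySem.Dict.ofList md).get? m <;>
        simp [pvRow, List.filterMap_append, hopt]
    rw [hkeys]
    congr 1
    apply List.map_congr_left
    intro m _
    rw [hrows m]

-- ===== VERDICT (by name: the statement is the Claim_ definition above) =====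
theorem getMonthlyCases_spec : Claim_equal_getMonthlyCases := by
  intro data _hdom hpre
  unfold Spec_getMonthlyCases getMonthlyCases getMonthlyCases_alt
  rw [pv_big data hpre]
  simp [pvMonths]
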